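-- pv_equiv track=rewrite | github.com/johnrmann/explorers | src/math/vector2.py | vector2_bounding_rect
-- ===== SOURCE A (Python) =====
-- def vector2_bounding_rect(ps):
-- 	"""
-- 	Returns the (origin, dimensions) of the smallest rect that fits all given
-- 	points.
-- 	"""
-- 	if len(ps) == 0:
-- 		raise ValueError('Need non-empty list')
-- 	min_x = float('inf')
-- 	max_x = -min_x
-- 	min_y = float('inf')
-- 	max_y = -min_y
-- 	for p in ps:
-- 		x, y = p
-- 		min_x = min(x, min_x)
-- 		min_y = min(y, min_y)
-- 		max_x = max(x, max_x)
-- 		max_y = max(y, max_y)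
-- 	origin = (min_x, min_y)
-- 	dimensions = (max_x - min_x, max_y - min_y)
-- 	return (origin, dimensions)
-- ===== SOURCE B (Python) =====
-- def vector2_bounding_rect(ps):
-- 	"""
-- 	Returns the (origin, dimensions) of the smallest rect that fits all given
-- 	points.
-- 	"""
-- 	if len(ps) == 0:
-- 		raise ValueError('Need non-empty list')
-- 	xs = [x for x, y in ps]
-- 	ys = [y for x, y in ps]
-- 	min_x, max_x = min(xs), max(xs)
-- 	min_y, max_y = min(ys), max(ys)
-- 	return ((min_x, min_y), (max_x - min_x, max_y - min_y))
-- ===== Notes on version B (the rewrite author's own statement) =====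
-- stated objective: simpler
-- what changed: Replaces the fused four-accumulator loop with infinity sentinels by coordinate extraction via comprehensions followed by library min/max scans.
import Mathlib
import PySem

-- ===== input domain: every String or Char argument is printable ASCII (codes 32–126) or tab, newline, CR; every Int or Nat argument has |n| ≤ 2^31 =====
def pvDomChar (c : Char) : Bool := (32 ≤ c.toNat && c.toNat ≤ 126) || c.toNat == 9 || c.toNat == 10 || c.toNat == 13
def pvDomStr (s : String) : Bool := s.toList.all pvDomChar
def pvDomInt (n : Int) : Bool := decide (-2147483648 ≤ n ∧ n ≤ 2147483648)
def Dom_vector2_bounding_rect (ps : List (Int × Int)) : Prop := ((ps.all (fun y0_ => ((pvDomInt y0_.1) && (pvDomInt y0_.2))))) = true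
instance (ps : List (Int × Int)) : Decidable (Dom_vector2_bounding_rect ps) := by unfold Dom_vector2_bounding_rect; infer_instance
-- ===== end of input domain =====

-- B replaces A's fused four-accumulator loop (infinity sentinels) by coordinate
-- extraction with comprehensions plus library min/max scans: simpler decomposition.


-- ===== PORT A =====
-- float('inf') / -float('inf') sentinels are modelled by `none` (min/max with the
-- sentinel returns the other argument, exactly as with ±inf on ints); Pre_ excludes
-- the empty list (Python raises ValueError), so the final accumulators are `some`
-- and the `.getD 0` defaults are never reached.
def pvMinO (x : Int) (o : Option Int) : Option Int :=
  some (match o with | none => x | some m => min x m)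

def pvMaxO (x : Int) (o : Option Int) : Option Int :=
  some (match o with | none => x | some m => max x m)

def pvStepA (s : Option Int × Option Int × Option Int × Option Int) (p : Int × Int) :
    Option Int × Option Int × Option Int × Option Int :=
  (pvMinO p.1 s.1, pvMinO p.2 s.2.1, pvMaxO p.1 s.2.2.1, pvMaxO p.2 s.2.2.2)

def vector2_bounding_rect (ps : List (Int × Int)) : (Int × Int) × (Int × Int) :=
  let s := ps.foldl pvStepA (none, none, none, none)
  let min_x := s.1.getD 0
  let min_y := s.2.1.getD 0
  let max_x := s.2.2.1.getD 0
  let max_y := s.2.2.2.getD 0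
  ((min_x, min_y), (max_x - min_x, max_y - min_y))

-- ===== PORT B =====
-- min(xs)/max(xs) → PySem.List.min?/max? (identity key); Pre_ excludes the empty
-- list, so the `.getD 0` defaults are never reached.
def vector2_bounding_rect_alt (ps : List (Int × Int)) : (Int × Int) × (Int × Int) :=
  let xs := ps.map (fun p => p.1)
  let ys := ps.map (fun p => p.2)
  let min_x := (PySem.List.min? xs (fun v => v)).getD 0
  let max_x := (PySem.List.max? xs (fun v => v)).getD 0
  let min_y := (PySem.List.min? ys (fun v => v)).getD 0
  let max_y := (PySem.List.max? ys (fun v => v)).getD 0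
  ((min_x, min_y), (max_x - min_x, max_y - min_y))

-- ===== PRECONDITION & SPEC =====
-- Pre_ excludes exactly the empty list, on which Python A raises ValueError.
def Pre_vector2_bounding_rect (ps : List (Int × Int)) : Prop := ps ≠ []
instance (ps : List (Int × Int)) : Decidable (Pre_vector2_bounding_rect ps) := by
  unfold Pre_vector2_bounding_rect; infer_instance

def pvWitness_vector2_bounding_rect : (List (Int × Int)) := [(1, 2), (-3, 4)]

def Spec_vector2_bounding_rect (ps : List (Int × Int)) (out : (Int × Int) × (Int × Int)) : Prop :=
  out = vector2_bounding_rect_alt ps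
instance (ps : List (Int × Int)) (out : (Int × Int) × (Int × Int)) :
    Decidable (Spec_vector2_bounding_rect ps out) := by
  unfold Spec_vector2_bounding_rect; infer_instance

-- ===== CLAIM (what is proved, stated in full; the proofs are below) =====
def Claim_equal_vector2_bounding_rect : Prop :=
  ∀ (ps : List (Int × Int)), Dom_vector2_bounding_rect ps →
    Pre_vector2_bounding_rect ps →
    Spec_vector2_bounding_rect ps (vector2_bounding_rect ps)

-- ===== LEMMAS AND PROOFS =====
theorem pvFoldA_somes (t : List (Int × Int)) (a b c d : Int) :
    t.foldl pvStepA (some a, some b, some c, some d) =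
      (some ((t.map Prod.fst).foldl min a),
       some ((t.map Prod.snd).foldl min b),
       some ((t.map Prod.fst).foldl max c),
       some ((t.map Prod.snd).foldl max d)) := by
  induction t generalizing a b c d with
  | nil => rfl
  | cons p t ih =>
      simp [List.foldl, pvStepA, pvMinO, pvMaxO, ih, min_comm, max_comm]

theorem vector2_bounding_rect_spec : Claim_equal_vector2_bounding_rect := by
  intro ps _ hpre
  cases ps with
  | nil => exact absurd rfl hpre
  | cons p t =>
      unfold Spec_vector2_bounding_rect vector2_bounding_rect vector2_bounding_rect_alt
      simp only [List.foldl_cons, List.map_cons, pvStepA, pvMinO, pvMaxO,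
        PySem.List.min?_id_cons, PySem.List.max?_id_cons, pvFoldA_somes]
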